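-- pv_equiv track=rewrite | github.com/amit7815/Revision | recursion/rec_string/replaceab.py | replaceab
-- ===== SOURCE A (Python) =====
-- def replaceab(s):
--     l = len(s)
--     if l==0:
--         return s
--     smallOut = replaceab(s[1:])
--     if s[0] == 'a':
--         return 'b' + smallOut
--     else:
--         return smallOut
-- ===== SOURCE B (Python) =====
-- def replaceab(s):
--     return 'b' * s.count('a')
-- ===== Notes on version B (the rewrite author's own statement) =====
-- stated objective: simpler
-- what changed: Replaced the per-character recursion by the closed form 'b' * s.count('a'), since A emits one 'b' per 'a' and drops everything else.
import Mathlib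
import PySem

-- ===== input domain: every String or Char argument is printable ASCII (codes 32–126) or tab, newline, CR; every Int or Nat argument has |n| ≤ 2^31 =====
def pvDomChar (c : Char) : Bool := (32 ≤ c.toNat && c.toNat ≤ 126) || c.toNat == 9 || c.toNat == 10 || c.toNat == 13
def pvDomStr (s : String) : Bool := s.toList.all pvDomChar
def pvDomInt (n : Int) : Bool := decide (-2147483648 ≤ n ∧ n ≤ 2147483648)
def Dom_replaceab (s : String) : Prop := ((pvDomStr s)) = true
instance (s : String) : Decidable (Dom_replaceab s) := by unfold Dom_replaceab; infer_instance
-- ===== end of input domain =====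

-- ===== PORT A =====
-- recursion over the character list: empty → s (empty), else recurse on the tail,
-- prepend 'b' when the head is 'a'
def replaceabGo : List Char → List Char
  | [] => []
  | c :: rest =>
    let smallOut := replaceabGo rest
    if c = 'a' then 'b' :: smallOut else smallOut

def replaceab (s : String) : String := String.mk (replaceabGo s.toList)

-- ===== PORT B =====
-- B: 'b' * s.count('a')
def replaceab_alt (s : String) : String := String.mk (List.replicate (s.toList.count 'a') 'b')

-- ===== PRECONDITION & SPEC =====
def Spec_replaceab (s : String) (out : String) : Prop := out = replaceab_alt s
instance (s : String) (out : String) : Decidable (Spec_replaceab s out) := by unfold Spec_replaceab; infer_instance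

-- ===== CLAIM (what is proved, stated in full; the proofs are below) =====
def Claim_equal_replaceab : Prop := ∀ (s : String), Dom_replaceab s → Spec_replaceab s (replaceab s)

-- ===== LEMMAS AND PROOFS =====

-- ===== VERDICT (by name: the statement is the Claim_ definition above) =====
theorem replaceabGo_eq (l : List Char) : replaceabGo l = List.replicate (l.count 'a') 'b' := by
  induction l with
  | nil => simp [replaceabGo]
  | cons c rest ih =>
    simp only [replaceabGo, ih, List.count_cons]
    by_cases h : c = 'a' <;> simp [h, List.replicate_succ]

theorem replaceab_spec : Claim_equal_replaceab := by
  intro s _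
  unfold Spec_replaceab replaceab replaceab_alt
  rw [replaceabGo_eq]
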